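-- pv_equiv track=rewrite | github.com/wangjoshuah/Advent-Of-Code-2018 | day-07/solution.py | find_all_nodes_to_work
-- ===== SOURCE A (Python) =====
-- def find_all_nodes_to_work(nodes, edges):
--     possible_nodes_to_work = nodes.copy()
--     for parent, children in edges.items():
--         for child in children:
--             if child in possible_nodes_to_work:
--                 possible_nodes_to_work.remove(child)
--
--     sorted_work = list(possible_nodes_to_work)
--     sorted_work.sort()
--     return sorted_work
-- ===== SOURCE B (Python) =====
-- def find_all_nodes_to_work(nodes, edges):
--     # multiset-count the children once, then one consuming pass over nodes
--     remaining = {}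
--     for children in edges.values():
--         for c in children:
--             remaining[c] = remaining.get(c, 0) + 1
--     out = []
--     for n in nodes:
--         k = remaining.get(n, 0)
--         if k != 0:
--             remaining[n] = k - 1
--         else:
--             out.append(n)
--     return sorted(out)
-- ===== Notes on version B (the rewrite author's own statement) =====
-- stated objective: alternative
-- what changed: Instead of copying the node list and doing a membership-test-and-remove scan of that list for every child occurrence, B counts all child occurrences into a dict once and then emits the roots in a single counter-consuming pass over nodes, before sorting.
import Mathlib
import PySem

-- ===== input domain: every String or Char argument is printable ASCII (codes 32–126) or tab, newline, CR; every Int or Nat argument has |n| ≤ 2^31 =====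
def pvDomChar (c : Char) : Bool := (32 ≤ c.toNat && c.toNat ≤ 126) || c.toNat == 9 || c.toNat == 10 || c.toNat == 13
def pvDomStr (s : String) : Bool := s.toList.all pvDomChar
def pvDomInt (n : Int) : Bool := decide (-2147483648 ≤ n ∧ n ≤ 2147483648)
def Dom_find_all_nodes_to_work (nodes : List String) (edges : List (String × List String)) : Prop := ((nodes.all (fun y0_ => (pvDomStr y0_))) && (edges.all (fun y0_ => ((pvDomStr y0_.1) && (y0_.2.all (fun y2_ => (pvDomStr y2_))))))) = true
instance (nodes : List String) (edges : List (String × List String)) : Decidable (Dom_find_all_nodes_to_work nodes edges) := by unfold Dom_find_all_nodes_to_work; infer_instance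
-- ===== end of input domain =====

-- B replaces A's per-child membership-test-and-remove scans with one child-occurrence counter
-- and a single counter-consuming pass over nodes (objective: alternative).

-- ===== PORT A =====
def find_all_nodes_to_work (nodes : List String) (edges : List (String × List String)) : List String :=
  let possible :=
    edges.foldl (fun acc p =>
      p.2.foldl (fun acc2 child =>
        if child ∈ acc2 then (PySem.List.remove? acc2 child).getD acc2 else acc2) acc) nodes
  PySem.List.sorted possible (fun x => x) false

-- ===== PORT B =====
def find_all_nodes_to_work_alt (nodes : List String) (edges : List (String × List String)) : List String :=
  let remaining : PySem.Dict String Int :=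
    edges.foldl (fun d p => p.2.foldl (fun d2 c => d2.insert c (d2.getD c 0 + 1)) d) PySem.Dict.empty
  let res :=
    nodes.foldl (fun (st : List String × PySem.Dict String Int) n =>
      let k := st.2.getD n 0
      if k ≠ 0 then (st.1, st.2.insert n (k - 1)) else (st.1 ++ [n], st.2))
      ([], remaining)
  PySem.List.sorted res.1 (fun x => x) false

-- ===== PRECONDITION & SPEC =====
def Spec_find_all_nodes_to_work (nodes : List String) (edges : List (String × List String)) (out : List String) : Prop := out = find_all_nodes_to_work_alt nodes edges
instance (nodes : List String) (edges : List (String × List String)) (out : List String) : Decidable (Spec_find_all_nodes_to_work nodes edges out) := by unfold Spec_find_all_nodes_to_work; infer_instance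

-- ===== CLAIM (what is proved, stated in full; the proofs are below) =====
def Claim_equal_find_all_nodes_to_work : Prop := ∀ (nodes : List String) (edges : List (String × List String)), Dom_find_all_nodes_to_work nodes edges → Spec_find_all_nodes_to_work nodes edges (find_all_nodes_to_work nodes edges)

-- ===== LEMMAS AND PROOFS =====

-- the nested fold over edges is the fold over the concatenation of their child lists
theorem pv_foldl_pairs {α β γ : Type} (edges : List (γ × List β)) (f : α → β → α) (init : α) :
    edges.foldl (fun a p => p.2.foldl f a) init = (edges.flatMap (·.2)).foldl f init := by
  induction edges generalizing init with
  | nil => rfl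
  | cons p t ih => simp [List.foldl_append, ih]

-- A's removal loop: the count of each value after processing child list cs
theorem pv_countA (cs : List String) (l : List String) (v : String) :
    (cs.foldl (fun acc c => if c ∈ acc then (PySem.List.remove? acc c).getD acc else acc) l).count v
      = l.count v - cs.count v := by
  induction cs generalizing l with
  | nil => simp
  | cons c t ih =>
    simp only [List.foldl_cons]
    by_cases hc : c ∈ l
    · rw [if_pos hc, PySem.List.remove?_eq_some_erase l c hc, Option.getD_some, ih]
      have h1 : (l.erase c).count v = l.count v - if v = c then 1 else 0 := by
        by_cases hv : v = c
        · subst hv; simp [List.count_erase_self]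
        · simp [List.count_erase_of_ne hv, hv]
      have h2 : 1 ≤ l.count c := List.one_le_count_iff.mpr hc
      rw [h1]
      by_cases hv : v = c
      · subst hv; simp; omega
      · simp [hv, Ne.symm hv]
    · rw [if_neg hc, ih]
      by_cases hv : v = c
      · subst hv
        have : l.count v = 0 := List.count_eq_zero.mpr hc
        simp [this]
      · simp [Ne.symm hv]

-- B's consuming pass: the count of each value in the output list
theorem pv_countB (ns : List String) (st : List String × PySem.Dict String Int) (v : String)
    (hnn : 0 ≤ st.2.getD v 0) :
    ((ns.foldl (fun (st : List String × PySem.Dict String Int) n =>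
        let k := st.2.getD n 0
        if k ≠ 0 then (st.1, st.2.insert n (k - 1)) else (st.1 ++ [n], st.2)) st).1).count v
      = st.1.count v + (ns.count v - (st.2.getD v 0).toNat) := by
  induction ns generalizing st with
  | nil => simp
  | cons n t ih =>
    simp only [List.foldl_cons]
    by_cases hk : st.2.getD n 0 ≠ 0
    · rw [if_pos hk]
      have hget : ((st.2.insert n (st.2.getD n 0 - 1)).getD v 0)
          = if v = n then st.2.getD n 0 - 1 else st.2.getD v 0 := by
        simp [PySem.Dict.getD_insert]
      by_cases hv : v = n
      · subst hv
        have h1 : (1 : Int) ≤ st.2.getD v 0 := by omega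
        have := ih (st.1, st.2.insert v (st.2.getD v 0 - 1)) (by rw [hget, if_pos rfl]; omega)
        dsimp only at this
        rw [hget, if_pos rfl] at this
        rw [this]
        simp only [List.count_cons_self]
        omega
      · have := ih (st.1, st.2.insert n (st.2.getD n 0 - 1)) (by rw [hget, if_neg hv]; exact hnn)
        dsimp only at this
        rw [this]
        simp [hget, hv, Ne.symm hv]
    · rw [if_neg hk]
      have hz : st.2.getD n 0 = 0 := by omega
      by_cases hv : v = n
      · subst hv
        have := ih (st.1 ++ [v], st.2) hnn
        dsimp only at this
        rw [this]
        simp [hz, List.count_cons_self, List.count_append]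
        omega
      · have := ih (st.1 ++ [n], st.2) hnn
        dsimp only at this
        rw [this]
        simp [List.count_append, Ne.symm hv]

-- ===== VERDICT (by name: the statement is the Claim_ definition above) =====
theorem find_all_nodes_to_work_spec : Claim_equal_find_all_nodes_to_work := by
  intro nodes edges _
  unfold Spec_find_all_nodes_to_work find_all_nodes_to_work find_all_nodes_to_work_alt
  simp only [pv_foldl_pairs]
  set cs := edges.flatMap (·.2) with hcs
  apply PySem.List.sorted_eq_sorted_of_perm _ _ _ (fun a b h => h)
  rw [List.perm_iff_count]
  intro v
  rw [pv_countA]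
  have hcnt : ∀ w : String,
      ((cs.foldl (fun d2 c => d2.insert c (d2.getD c 0 + 1)) PySem.Dict.empty).getD w 0)
        = (cs.count w : Int) := by
    intro w
    rw [PySem.Dict.getD_foldl_insert_add_one]
    norm_num [show (PySem.Dict.empty : PySem.Dict String Int).getD w 0 = 0 from rfl]
  rw [pv_countB _ _ _ (by rw [hcnt]; positivity)]
  rw [hcnt]
  simp
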